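-- pv_equiv track=rewrite | github.com/WIKKIwk/ERPNext_stock_manager_tg_integration | stock_manager_bot/delivery.py | _parse_delivery_customer
-- ===== SOURCE A (Python) =====
-- from typing import Any, Dict, Optional, Tuple
--
-- def _parse_delivery_customer(text: str) -> Optional[Dict[str, str]]:
--     lines = [line.strip() for line in text.splitlines() if line.strip()]
--     if not lines or not any("#customer" in line.lower() or "customer:" in line.lower() for line in lines):
--         return None
--     code = None
--     label = None
--     for line in lines:
--         lowered = line.lower()
--         if lowered.startswith("customer:"):
--             label = line.split(":", 1)[1].strip()
--         if lowered.startswith("code:"):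
--             code = line.split(":", 1)[1].strip()
--     if not code:
--         code = label
--     if not code:
--         return None
--     return {"code": code, "label": label or code}
-- ===== SOURCE B (Python) =====
-- def _parse_delivery_customer(text):
--     lines = [line.strip() for line in text.splitlines() if line.strip()]
--     if not any("#customer" in line.lower() or "customer:" in line.lower() for line in lines):
--         return None
--
--     def last_value(prefix):
--         for line in reversed(lines):
--             if line.lower().startswith(prefix):
--                 return line.split(":", 1)[1].strip()
--         return None
--
--     label = last_value("customer:")
--     code = last_value("code:") or label
--     if not code:
--         return None
--     return {"code": code, "label": label or code}
-- ===== Notes on version B (the rewrite author's own statement) =====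
-- stated objective: simpler
-- what changed: A's forward loop with two mutable last-assignment accumulators is replaced by two early-exit backward scans (first match over reversed lines = last assignment), plus inline or-fallbacks instead of reassignment.
import Mathlib
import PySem

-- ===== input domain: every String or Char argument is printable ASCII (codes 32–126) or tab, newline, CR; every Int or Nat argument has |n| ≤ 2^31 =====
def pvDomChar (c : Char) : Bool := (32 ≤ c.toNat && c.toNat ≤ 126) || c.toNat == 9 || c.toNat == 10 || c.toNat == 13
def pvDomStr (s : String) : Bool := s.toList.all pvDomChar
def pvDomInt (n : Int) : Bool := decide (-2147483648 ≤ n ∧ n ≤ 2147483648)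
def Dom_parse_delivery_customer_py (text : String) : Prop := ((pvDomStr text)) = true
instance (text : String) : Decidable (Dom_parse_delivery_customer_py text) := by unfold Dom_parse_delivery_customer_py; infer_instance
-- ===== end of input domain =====

-- B replaces A's forward loop with two mutable accumulators by two early-exit scans of the
-- reversed line list (first match from the back = last assignment); objective: simpler, same cost.

-- shared by both ports: line.split(":", 1)[1].strip()  (both Pythons contain this exact expression)
def pvAfterColon (line : String) : String :=
  PySem.Str.strip (((PySem.Str.splitMax? line ":" 1).getD []).getD 1 "")

-- lines = [line.strip() for line in text.splitlines() if line.strip()]  (identical in both Pythons)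
def pvLines (text : String) : List String :=
  (PySem.Str.splitlines text).filterMap (fun line =>
    let s := PySem.Str.strip line
    if s = "" then none else some s)

-- "#customer" in line.lower() or "customer:" in line.lower()  (identical in both Pythons)
def pvTrigger (line : String) : Bool :=
  PySem.Str.isIn "#customer" (PySem.Str.lower line) || PySem.Str.isIn "customer:" (PySem.Str.lower line)

-- ===== PORT A =====
def parse_delivery_customer_py (text : String) : Option (List (String × String)) :=
  let lines := pvLines text
  if lines = [] ∨ ¬ (lines.any pvTrigger) then none
  else
    -- for line in lines: update (code, label)
    let p : Option String × Option String :=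
      lines.foldl (fun cl line =>
        let lowered := PySem.Str.lower line
        let cl := if PySem.Str.startswith lowered "customer:" then (cl.1, some (pvAfterColon line)) else cl
        if PySem.Str.startswith lowered "code:" then (some (pvAfterColon line), cl.2) else cl)
        (none, none)
    let label := p.2
    -- if not code: code = label
    let code := match p.1 with
      | none => label
      | some s => if s = "" then label else some s
    match code with
    | none => none
    | some c =>
      if c = "" then none
      else
        -- dict literal with two distinct keys, as an association list in insertion order
        some [("code", c), ("label", match label with | none => c | some l => if l = "" then c else l)]

-- ===== PORT B =====
-- code or label / label or code
def pvOr (a b : Option String) : Option String :=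
  match a with
  | none => b
  | some s => if s = "" then b else a

-- last_value(prefix): first match over reversed(lines)
def pvLastValue (lines : List String) (pre : String) : Option String :=
  match lines.reverse.find? (fun line => PySem.Str.startswith (PySem.Str.lower line) pre) with
  | none => none
  | some line => some (pvAfterColon line)

def parse_delivery_customer_py_alt (text : String) : Option (List (String × String)) :=
  let lines := pvLines text
  if ¬ (lines.any pvTrigger) then none
  else
    let label := pvLastValue lines "customer:"
    let code := pvOr (pvLastValue lines "code:") label
    match code with
    | none => none
    | some c =>
      if c = "" then none
      else some [("code", c), ("label", (pvOr label (some c)).getD c)]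

-- ===== PRECONDITION & SPEC =====
def Spec_parse_delivery_customer_py (text : String) (out : Option (List (String × String))) : Prop := out = parse_delivery_customer_py_alt text
instance (text : String) (out : Option (List (String × String))) : Decidable (Spec_parse_delivery_customer_py text out) := by unfold Spec_parse_delivery_customer_py; infer_instance

-- ===== CLAIM (what is proved, stated in full; the proofs are below) =====
def Claim_equal_parse_delivery_customer_py : Prop := ∀ (text : String), Dom_parse_delivery_customer_py text → Spec_parse_delivery_customer_py text (parse_delivery_customer_py text)

-- ===== LEMMAS AND PROOFS =====

-- A's fold computes, in each component, the value of the last matching line — which is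
-- exactly the first match of B's backward scan.
theorem pv_fold_eq_find (lines : List String) (init : Option String × Option String) :
    lines.foldl (fun cl line =>
        let lowered := PySem.Str.lower line
        let cl := if PySem.Str.startswith lowered "customer:" then (cl.1, some (pvAfterColon line)) else cl
        if PySem.Str.startswith lowered "code:" then (some (pvAfterColon line), cl.2) else cl)
      init
    = ((match lines.reverse.find? (fun line => PySem.Str.startswith (PySem.Str.lower line) "code:") with
        | none => init.1
        | some line => some (pvAfterColon line)),
       (match lines.reverse.find? (fun line => PySem.Str.startswith (PySem.Str.lower line) "customer:") with
        | none => init.2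
        | some line => some (pvAfterColon line))) := by
  induction lines generalizing init with
  | nil => simp
  | cons a l ih =>
    simp only [List.foldl_cons, List.reverse_cons, List.find?_append, ih]
    by_cases h1 : PySem.Str.startswith (PySem.Str.lower a) "customer:" <;>
    by_cases h2 : PySem.Str.startswith (PySem.Str.lower a) "code:" <;>
    cases hc : l.reverse.find? (fun line => PySem.Str.startswith (PySem.Str.lower line) "code:") <;>
    cases hl : l.reverse.find? (fun line => PySem.Str.startswith (PySem.Str.lower line) "customer:") <;>
    simp_all [List.find?, Option.or]

-- ===== VERDICT (by name: the statement is the Claim_ definition above) =====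
theorem parse_delivery_customer_py_spec : Claim_equal_parse_delivery_customer_py := by
  intro text _
  unfold Spec_parse_delivery_customer_py parse_delivery_customer_py parse_delivery_customer_py_alt
  simp only [pv_fold_eq_find, pvLastValue, pvOr]
  generalize pvLines text = ls
  by_cases hAny : ls.any pvTrigger
  · have hEmpty : ¬ ls = [] := by rintro rfl; simp at hAny
    simp only [hEmpty, hAny, not_true, or_false, if_false]
    generalize ls.reverse.find? (fun line => PySem.Str.startswith (PySem.Str.lower line) "code:") = fc
    generalize ls.reverse.find? (fun line => PySem.Str.startswith (PySem.Str.lower line) "customer:") = fl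
    cases fc <;> cases fl <;> simp only [Option.getD] <;> (try split_ifs) <;> simp_all
  · by_cases hE : ls = [] <;> simp [hAny, hE]
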